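-- pv_equiv track=rewrite | github.com/AnthonyGeile/CSC-120 | A1 Words/word_search.py | diagonal_construct
-- ===== SOURCE A (Python) =====
-- def diagonal_construct(grid, reverse):
--     row = []
--     for i in range(2):
--         #Reverses the horizontal axis of the grid
--         if reverse == 1: grid.reverse()
--         #Reverses the vertical axis of the grid
--         if i == 1:
--             new_grid = []
--             for i in grid:
--                 new_grid.append(i[::-1])
--
--         #Finds all possible words along the diagonals
--         for i in range((-len(grid)+3), (len(grid)-2)):
--             offset, _, x, y = i, [], 0, 0
--             if offset < 0:
--                 y=abs(offset)
--                 for i in range(len(grid)-y):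
--                     _.append(grid[x][y])
--                     x += 1
--                     y += 1
--             elif offset > 0:
--                 x=abs(offset)
--                 for i in range(len(grid)-x):
--                     _.append(grid[x][y])
--                     x += 1
--                     y += 1
--             elif offset == 0:
--                 for i in range(len(grid)):
--                     _.append(grid[x][y])
--                     x += 1
--                     y += 1
--             row.append(''.join(_))
--     return row
-- ===== SOURCE B (Python) =====
-- def diagonal_construct(grid, reverse):
--     n = len(grid)
--     if n < 3:
--         return []
--
--     def diag_pass(g):
--         # one row-major pass: bucket every cell by its diagonal offset x - y
--         buckets = {}
--         for x in range(n):
--             for y in range(n):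
--                 buckets.setdefault(x - y, []).append(g[x][y])
--         return [''.join(buckets.get(o, [])) for o in range(-n + 3, n - 2)]
--
--     first = grid[::-1] if reverse == 1 else grid
--     return diag_pass(first) + diag_pass(grid)
-- ===== Notes on version B (the rewrite author's own statement) =====
-- stated objective: idiomatic
-- what changed: Replaces the two in-place grid reversals, the dead new_grid pass and the three-branch per-diagonal x/y stepping loops with a single row-major pass that buckets cells into a dict keyed by offset x-y, then joins the buckets over the same offset range; grid is no longer mutated (A's net mutation is zero anyway).
-- outside the precondition, e.g. on diagonal_construct([['a'], ['b', 'c', 'd'], ['d', 'e', 'f']], 0): A returns ['acf', 'acf'], B raises IndexError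
import Mathlib
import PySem

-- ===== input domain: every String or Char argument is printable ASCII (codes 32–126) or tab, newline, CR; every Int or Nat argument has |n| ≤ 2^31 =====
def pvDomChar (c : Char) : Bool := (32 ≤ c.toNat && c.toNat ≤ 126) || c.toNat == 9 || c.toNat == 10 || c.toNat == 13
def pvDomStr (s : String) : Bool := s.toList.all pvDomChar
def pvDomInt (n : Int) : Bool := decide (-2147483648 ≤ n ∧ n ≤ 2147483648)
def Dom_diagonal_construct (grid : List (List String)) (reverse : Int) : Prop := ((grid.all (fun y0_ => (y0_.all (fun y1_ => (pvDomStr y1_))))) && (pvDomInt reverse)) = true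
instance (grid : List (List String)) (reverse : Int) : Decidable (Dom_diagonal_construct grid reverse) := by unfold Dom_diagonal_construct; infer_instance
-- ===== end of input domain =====

-- B replaces A's two in-place reversals, dead `new_grid` pass and three-branch per-diagonal
-- stepping loops by one row-major pass bucketing cells into a dict keyed by offset x - y
-- (idiomatic; same cost). A's net mutation of `grid` is zero (two reversals cancel or none
-- happen); B performs no mutation — the equivalence is about the return value.

-- ===== PORT A =====
def diagonal_construct (grid : List (List String)) (reverse : Int) : List String :=
  ((List.range 2).foldl (fun (st : List (List String) × List String) i =>
      -- if reverse == 1: grid.reverse()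
      let g := if reverse = 1 then st.1.reverse else st.1
      -- if i == 1: new_grid = [row[::-1] for row in grid]  (built, never used)
      let _new_grid := if i = 1 then some (g.map (fun r => r.reverse)) else none  -- r[::-1] is reversal (exact)
      -- for i in range(-len(grid)+3, len(grid)-2): …
      let row := (PySem.List.pyRange (-(g.length : Int) + 3) ((g.length : Int) - 2) 1).foldl
        (fun (row : List String) (offset : Int) =>
          let cells : List String :=
            if offset < 0 then
              ((PySem.List.pyRange 0 ((g.length : Int) - |offset|) 1).foldl
                (fun (s : List String × Int × Int) _ =>
                  (s.1 ++ [PySem.List.pyGetD (PySem.List.pyGetD g s.2.1 []) s.2.2 ""],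
                   s.2.1 + 1, s.2.2 + 1))
                ([], 0, |offset|)).1
            else if offset > 0 then
              ((PySem.List.pyRange 0 ((g.length : Int) - |offset|) 1).foldl
                (fun (s : List String × Int × Int) _ =>
                  (s.1 ++ [PySem.List.pyGetD (PySem.List.pyGetD g s.2.1 []) s.2.2 ""],
                   s.2.1 + 1, s.2.2 + 1))
                ([], |offset|, 0)).1
            else
              ((PySem.List.pyRange 0 (g.length : Int) 1).foldl
                (fun (s : List String × Int × Int) _ =>
                  (s.1 ++ [PySem.List.pyGetD (PySem.List.pyGetD g s.2.1 []) s.2.2 ""],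
                   s.2.1 + 1, s.2.2 + 1))
                ([], 0, 0)).1
          row ++ [PySem.Str.join "" cells])
        st.2
      (g, row))
    (grid, ([] : List String))).2

-- ===== PORT B =====
def diagonal_construct_alt (grid : List (List String)) (reverse : Int) : List String :=
  let n : Int := grid.length
  if n < 3 then []
  else
    let diagPass := fun (g : List (List String)) =>
      -- one row-major pass: buckets.setdefault(x - y, []).append(g[x][y])
      let buckets := (PySem.List.pyRange 0 n 1).foldl
        (fun (d : PySem.Dict Int (List String)) x =>
          (PySem.List.pyRange 0 n 1).foldl
            (fun (d : PySem.Dict Int (List String)) y =>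
              d.modify (x - y) []
                (· ++ [PySem.List.pyGetD (PySem.List.pyGetD g x []) y ""]))
            d)
        PySem.Dict.empty
      (PySem.List.pyRange (-n + 3) (n - 2) 1).map
        (fun o => PySem.Str.join "" (buckets.getD o []))
    let first := if reverse = 1 then grid.reverse else grid  -- grid[::-1] is reversal (exact)
    diagPass first ++ diagPass grid

-- ===== PRECONDITION & SPEC =====
-- Pre_ excludes ragged grids (a row shorter than the grid height, when there are at least 3
-- rows): A assumes a square grid and raises IndexError on most of them, and B's full
-- row-major pass raises there too — including the few ragged grids where A's narrower
-- diagonal scan happens to miss the short cells and still return.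
def Pre_diagonal_construct (grid : List (List String)) (reverse : Int) : Prop :=
  grid.length ≤ 2 ∨ ∀ row ∈ grid, grid.length ≤ row.length
instance (grid : List (List String)) (reverse : Int) : Decidable (Pre_diagonal_construct grid reverse) := by unfold Pre_diagonal_construct; infer_instance

def pvWitness_diagonal_construct : List (List String) × Int :=
  ([["a", "b", "c"], ["d", "e", "f"], ["g", "h", "i"]], 1)

def Spec_diagonal_construct (grid : List (List String)) (reverse : Int) (out : List String) : Prop := out = diagonal_construct_alt grid reverse
instance (grid : List (List String)) (reverse : Int) (out : List String) : Decidable (Spec_diagonal_construct grid reverse out) := by unfold Spec_diagonal_construct; infer_instance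

-- ===== CLAIM (what is proved, stated in full; the proofs are below) =====
def Claim_equal_diagonal_construct : Prop := ∀ (grid : List (List String)) (reverse : Int), Dom_diagonal_construct grid reverse → Pre_diagonal_construct grid reverse → Spec_diagonal_construct grid reverse (diagonal_construct grid reverse)

-- ===== LEMMAS AND PROOFS =====

-- g[x][y] under the total (default-valued) indexing both ports use
def pvCell (g : List (List String)) (x y : Int) : String :=
  PySem.List.pyGetD (PySem.List.pyGetD g x []) y ""

-- A's diagonal-stepping loop, in closed form
theorem pvScanA (g : List (List String)) (l : List Int) (init : List String) (x0 y0 : Int) :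
    (l.foldl (fun (s : List String × Int × Int) _ =>
        (s.1 ++ [PySem.List.pyGetD (PySem.List.pyGetD g s.2.1 []) s.2.2 ""],
         s.2.1 + 1, s.2.2 + 1)) (init, x0, y0)).1
      = init ++ (PySem.List.pyRange x0 (x0 + l.length) 1).map (fun x => pvCell g x (y0 - x0 + x)) := by
  induction l generalizing init x0 y0 with
  | nil =>
    simp
  | cons a l ih =>
    simp only [List.foldl_cons, List.length_cons]
    rw [ih]
    have h1 : x0 + ((l.length + 1 : Nat) : Int) = x0 + 1 + (l.length : Int) := by push_cast; ring
    rw [h1, PySem.List.pyRange_one_cons (show x0 < x0 + 1 + (l.length : Int) by omega),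
      List.map_cons]
    have h3 : (fun x => pvCell g x (y0 + 1 - (x0 + 1) + x)) = fun x => pvCell g x (y0 - x0 + x) := by
      funext x; congr 1; ring
    rw [h3]
    have h4 : y0 - x0 + x0 = y0 := by ring
    simp only [pvCell, h4, List.append_assoc, List.singleton_append]

-- filtering an increasing range for one key keeps at most one element
theorem pvFilterSingle (x o a n : Int) :
    (PySem.List.pyRange a n 1).filter (fun y => x - y == o)
      = if a ≤ x - o ∧ x - o < n then [x - o] else [] := by
  obtain ⟨k, hk⟩ : ∃ k, (n - a).toNat = k := ⟨_, rfl⟩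
  induction k generalizing a with
  | zero =>
    rw [PySem.List.pyRange_one_eq_nil (by omega), if_neg (by omega)]
    rfl
  | succ k ih =>
    have ha : a < n := by omega
    rw [PySem.List.pyRange_one_cons ha, List.filter_cons]
    by_cases hx : x - o = a
    · rw [if_pos (by simp [beq_iff_eq]; omega), ih (a + 1) (by omega), if_neg (by omega),
        if_pos (by omega)]
      simp [hx]
    · rw [if_neg (by simp [beq_iff_eq]; omega), ih (a + 1) (by omega)]
      by_cases hc : a + 1 ≤ x - o ∧ x - o < n
      · rw [if_pos hc, if_pos (by omega)]
      · rw [if_neg hc, if_neg (by omega)]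

-- a range comprehension guarded by an interval is the clipped range
theorem pvWindow {α : Type} (a b c d : Int) (f : Int → α) :
    (PySem.List.pyRange a b 1).flatMap (fun x => if c ≤ x ∧ x < d then [f x] else [])
      = (PySem.List.pyRange (max a c) (min b d) 1).map f := by
  obtain ⟨k, hk⟩ : ∃ k, (b - a).toNat = k := ⟨_, rfl⟩
  induction k generalizing a with
  | zero =>
    rw [PySem.List.pyRange_one_eq_nil (by omega), PySem.List.pyRange_one_eq_nil (by omega)]
    rfl
  | succ k ih =>
    have ha : a < b := by omega
    rw [PySem.List.pyRange_one_cons ha, List.flatMap_cons, ih (a + 1) (by omega)]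
    by_cases h : c ≤ a ∧ a < d
    · rw [if_pos h, (by omega : max (a + 1) c = a + 1), (by omega : max a c = a),
        PySem.List.pyRange_one_cons (by omega : a < min b d)]
      simp
    · rw [if_neg h]
      rcases (by omega : a < c ∨ d ≤ a) with hac | hda
      · rw [(by omega : max (a + 1) c = max a c)]
        simp
      · rw [PySem.List.pyRange_one_eq_nil (by omega), PySem.List.pyRange_one_eq_nil (by omega)]
        simp

-- B's bucket for offset o, in closed form
theorem pvBucket (g : List (List String)) (n o : Int) :
    (((PySem.List.pyRange 0 n 1).foldl
        (fun (d : PySem.Dict Int (List String)) x =>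
          (PySem.List.pyRange 0 n 1).foldl
            (fun (d : PySem.Dict Int (List String)) y =>
              d.modify (x - y) []
                (· ++ [PySem.List.pyGetD (PySem.List.pyGetD g x []) y ""]))
            d)
        PySem.Dict.empty).getD o [])
      = (PySem.List.pyRange (max 0 o) (min n (n + o)) 1).map (fun x => pvCell g x (x - o)) := by
  have h1 : ((PySem.List.pyRange 0 n 1).flatMap
        (fun x => (PySem.List.pyRange 0 n 1).map
          (fun y => ((x - y : Int), pvCell g x y)))).foldl
        (fun (d : PySem.Dict Int (List String)) p => d.modify p.1 [] (· ++ [p.2]))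
        PySem.Dict.empty
      = (PySem.List.pyRange 0 n 1).foldl
        (fun (d : PySem.Dict Int (List String)) x =>
          (PySem.List.pyRange 0 n 1).foldl
            (fun (d : PySem.Dict Int (List String)) y =>
              d.modify (x - y) []
                (· ++ [PySem.List.pyGetD (PySem.List.pyGetD g x []) y ""]))
            d)
        PySem.Dict.empty := by
    rw [List.foldl_flatMap]
    simp only [List.foldl_map]
    rfl
  rw [← h1, PySem.Dict.getD_foldl_modify_append, PySem.Dict.getD_empty, List.nil_append,
    List.filter_flatMap, List.map_flatMap]
  have h2 : ∀ x : Int,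
      (((PySem.List.pyRange 0 n 1).map (fun y => ((x - y : Int), pvCell g x y))).filter
          (fun p => p.1 == o)).map (fun p => p.2)
        = if o ≤ x ∧ x < n + o then [pvCell g x (x - o)] else [] := by
    intro x
    rw [List.filter_map]
    have hp : ((fun p : Int × String => p.1 == o) ∘ fun y => ((x - y : Int), pvCell g x y))
        = fun y => x - y == o := rfl
    rw [hp, pvFilterSingle x o 0 n]
    by_cases hc : (0 : Int) ≤ x - o ∧ x - o < n
    · rw [if_pos hc, if_pos (by omega)]
      simp
    · rw [if_neg hc, if_neg (by omega)]
      simp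
  calc ((PySem.List.pyRange 0 n 1).flatMap fun x =>
          (((PySem.List.pyRange 0 n 1).map (fun y => ((x - y : Int), pvCell g x y))).filter
            (fun p => p.1 == o)).map (fun p => p.2))
      = (PySem.List.pyRange 0 n 1).flatMap
          (fun x => if o ≤ x ∧ x < n + o then [pvCell g x (x - o)] else []) := by
        exact List.flatMap_congr (fun x _ => h2 x)
    _ = (PySem.List.pyRange (max 0 o) (min n (n + o)) 1).map (fun x => pvCell g x (x - o)) :=
        pvWindow 0 n o (n + o) _

-- one pass of A equals one pass of B over the same grid
theorem pvPass (g : List (List String)) (init : List String) :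
    (PySem.List.pyRange (-(g.length : Int) + 3) ((g.length : Int) - 2) 1).foldl
        (fun (row : List String) (offset : Int) =>
          row ++ [PySem.Str.join ""
            (if offset < 0 then
              ((PySem.List.pyRange 0 ((g.length : Int) - |offset|) 1).foldl
                (fun (s : List String × Int × Int) _ =>
                  (s.1 ++ [PySem.List.pyGetD (PySem.List.pyGetD g s.2.1 []) s.2.2 ""],
                   s.2.1 + 1, s.2.2 + 1))
                ([], 0, |offset|)).1
            else if offset > 0 then
              ((PySem.List.pyRange 0 ((g.length : Int) - |offset|) 1).foldl
                (fun (s : List String × Int × Int) _ =>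
                  (s.1 ++ [PySem.List.pyGetD (PySem.List.pyGetD g s.2.1 []) s.2.2 ""],
                   s.2.1 + 1, s.2.2 + 1))
                ([], |offset|, 0)).1
            else
              ((PySem.List.pyRange 0 (g.length : Int) 1).foldl
                (fun (s : List String × Int × Int) _ =>
                  (s.1 ++ [PySem.List.pyGetD (PySem.List.pyGetD g s.2.1 []) s.2.2 ""],
                   s.2.1 + 1, s.2.2 + 1))
                ([], 0, 0)).1)])
        init
      = init ++ (PySem.List.pyRange (-(g.length : Int) + 3) ((g.length : Int) - 2) 1).map
          (fun o => PySem.Str.join ""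
            ((PySem.List.pyRange (max 0 o) (min (g.length : Int) ((g.length : Int) + o)) 1).map
              (fun x => pvCell g x (x - o)))) := by
  rw [PySem.List.foldl_append_singleton_eq_map]
  congr 1
  apply List.map_congr_left
  intro o ho
  rw [PySem.List.mem_pyRange_one] at ho
  congr 1
  by_cases h1 : o < 0
  · rw [if_pos h1, abs_of_neg h1, pvScanA, PySem.List.length_pyRange_one, List.nil_append,
      (show (0 : Int) + ((((g.length : Int) - -o - 0).toNat : Nat) : Int) = (g.length : Int) + o by
        rw [Int.toNat_of_nonneg (by omega)]; ring),
      (show max 0 o = 0 by omega),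
      (show min (g.length : Int) ((g.length : Int) + o) = (g.length : Int) + o by omega)]
    apply List.map_congr_left
    intro x _
    congr 1
    ring
  · by_cases h2 : o > 0
    · rw [if_neg h1, if_pos h2, abs_of_pos h2, pvScanA, PySem.List.length_pyRange_one,
        List.nil_append,
        (show o + ((((g.length : Int) - o - 0).toNat : Nat) : Int) = (g.length : Int) by
          rw [Int.toNat_of_nonneg (by omega)]; ring),
        (show max 0 o = o by omega),
        (show min (g.length : Int) ((g.length : Int) + o) = (g.length : Int) by omega)]
      apply List.map_congr_left
      intro x _
      congr 1
      ring
    · have ho0 : o = 0 := by omega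
      subst ho0
      rw [if_neg h1, if_neg h2, pvScanA, PySem.List.length_pyRange_one, List.nil_append,
        (show (0 : Int) + ((((g.length : Int) - 0).toNat : Nat) : Int) = (g.length : Int) by
          rw [Int.toNat_of_nonneg (by omega)]; ring),
        (show max 0 (0 : Int) = 0 by omega),
        (show min (g.length : Int) ((g.length : Int) + 0) = (g.length : Int) by omega)]
      apply List.map_congr_left
      intro x _
      congr 1
      ring

-- ===== VERDICT (by name: the statement is the Claim_ definition above) =====
theorem diagonal_construct_spec : Claim_equal_diagonal_construct := by
  intro grid reverse _dom _pre
  unfold Spec_diagonal_construct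
  have h2 : List.range 2 = [0, 1] := rfl
  by_cases hn : (grid.length : Int) < 3
  · by_cases hrev : reverse = 1 <;>
      simp only [diagonal_construct, diagonal_construct_alt, h2, List.foldl_cons, List.foldl_nil,
        hrev, if_true, if_false, reduceIte, List.length_reverse, List.reverse_reverse,
        if_pos hn] <;>
      rw [show PySem.List.pyRange (-(grid.length : Int) + 3) ((grid.length : Int) - 2) 1 = []
            from PySem.List.pyRange_one_eq_nil (by omega)] <;>
      simp
  · by_cases hrev : reverse = 1
    · simp only [diagonal_construct, diagonal_construct_alt, h2, List.foldl_cons, List.foldl_nil,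
        hrev, reduceIte, if_neg hn]
      rw [pvPass, pvPass]
      simp [List.length_reverse, List.reverse_reverse, pvBucket]
    · simp only [diagonal_construct, diagonal_construct_alt, h2, List.foldl_cons, List.foldl_nil,
        if_neg hrev, if_neg hn]
      rw [pvPass, pvPass]
      simp [pvBucket]
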